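-- pv_equiv track=rewrite | github.com/vikas95/AIR-retriever | Compute_F1.py | get_negative_flag
-- ===== SOURCE A (Python) =====
-- def get_negative_flag(list1): ## this flag will be used to determine if the coherence sequence is opposite to the one in the given passage
--     list1 = [int(i1) for i1 in list1]
--
--     negative_flag = 0
--     for i,val in enumerate(list1[:-1]):
--         if val - list1[i+1] > 0:
--            negative_flag = 1
--            break
--
--     return negative_flag
-- ===== SOURCE B (Python) =====
-- def get_negative_flag(list1):
--     ints = [int(i1) for i1 in list1]
--     return 0 if ints == sorted(ints) else 1
-- ===== Notes on version B (the rewrite author's own statement) =====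
-- stated objective: simpler
-- what changed: Replaces the early-exit adjacent-decrease scan (enumerate over list1[:-1] with indexed lookahead and a break) by a one-line sort-and-compare test of whether the list is already non-decreasing.
import Mathlib
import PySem

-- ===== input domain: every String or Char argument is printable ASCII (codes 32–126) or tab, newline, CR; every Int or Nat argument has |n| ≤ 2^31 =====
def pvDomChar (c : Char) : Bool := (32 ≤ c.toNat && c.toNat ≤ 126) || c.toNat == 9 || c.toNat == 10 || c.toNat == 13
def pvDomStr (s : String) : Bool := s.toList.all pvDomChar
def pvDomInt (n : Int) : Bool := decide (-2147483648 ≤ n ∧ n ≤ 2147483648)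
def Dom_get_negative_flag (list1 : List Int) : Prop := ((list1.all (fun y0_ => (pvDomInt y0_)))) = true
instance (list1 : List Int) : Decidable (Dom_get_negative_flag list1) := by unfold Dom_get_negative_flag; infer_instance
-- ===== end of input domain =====

-- B replaces A's early-exit adjacent-decrease scan by a sort-and-compare sortedness test (simpler).

-- ===== PORT A =====
-- the 'for i,val in enumerate(list1[:-1]): if val - list1[i+1] > 0: …break' loop:
-- each step looks at an element and its successor, stopping with 1 at the first decrease
def pvALoop : List Int → Int
  | val :: next :: rest => if val - next > 0 then 1 else pvALoop (next :: rest)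
  | _ => 0

def get_negative_flag (list1 : List Int) : Int :=
  pvALoop list1

-- ===== PORT B =====
def get_negative_flag_alt (list1 : List Int) : Int :=
  if list1 = PySem.List.sorted list1 (fun x => x) false then 0 else 1

-- ===== PRECONDITION & SPEC =====
def Spec_get_negative_flag (list1 : List Int) (out : Int) : Prop := out = get_negative_flag_alt list1
instance (list1 : List Int) (out : Int) : Decidable (Spec_get_negative_flag list1 out) := by unfold Spec_get_negative_flag; infer_instance

-- ===== CLAIM (what is proved, stated in full; the proofs are below) =====
def Claim_equal_get_negative_flag : Prop := ∀ (list1 : List Int), Dom_get_negative_flag list1 → Spec_get_negative_flag list1 (get_negative_flag list1)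

-- ===== LEMMAS AND PROOFS =====
theorem pvALoop_eq_pairwise (l : List Int) :
    pvALoop l = if l.Pairwise (fun a b => a ≤ b) then 0 else 1 := by
  induction l with
  | nil => simp [pvALoop]
  | cons a t ih =>
    cases t with
    | nil => simp [pvALoop]
    | cons b r =>
      by_cases hab : a ≤ b
      · have hiff : (a :: b :: r).Pairwise (fun x y => x ≤ y) ↔ (b :: r).Pairwise (fun x y => x ≤ y) := by
          constructor
          · exact List.Pairwise.of_cons
          · intro hp
            refine List.pairwise_cons.mpr ⟨?_, hp⟩
            intro x hx
            rcases List.mem_cons.mp hx with h1 | h2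
            · omega
            · exact hab.trans (List.rel_of_pairwise_cons hp h2)
        have hlt : ¬ (a - b > 0) := by omega
        simp only [pvALoop, if_neg hlt, ih, hiff]
      · have hlt : a - b > 0 := by omega
        have hnp : ¬ (a :: b :: r).Pairwise (fun x y => x ≤ y) := by
          intro hp
          exact hab (List.rel_of_pairwise_cons hp (List.mem_cons_self))
        simp only [pvALoop, if_pos hlt, if_neg hnp]

theorem sorted_fix_iff_pairwise (l : List Int) :
    (l = PySem.List.sorted l (fun x => x) false) ↔ l.Pairwise (fun a b => a ≤ b) := by
  constructor
  · intro h
    have hp := PySem.List.sorted_pairwise (xs := l) (key := fun x => x)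
    rw [← h] at hp
    exact hp
  · intro h
    exact (PySem.List.sorted_eq_self_of_pairwise (xs := l) (key := fun x => x) h).symm

-- ===== VERDICT (by name: the statement is the Claim_ definition above) =====
theorem get_negative_flag_spec : Claim_equal_get_negative_flag := by
  intro l _
  unfold Spec_get_negative_flag get_negative_flag get_negative_flag_alt
  rw [pvALoop_eq_pairwise]
  by_cases h : l.Pairwise (fun a b => a ≤ b)
  · rw [if_pos h, if_pos ((sorted_fix_iff_pairwise l).mpr h)]
  · rw [if_neg h, if_neg (fun hh => h ((sorted_fix_iff_pairwise l).mp hh))]
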